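-- pv_equiv track=rewrite | github.com/MultiTechSystems/device-payload-schema | tools/analyze-proto.py | estimate_message_size
-- ===== SOURCE A (Python) =====
-- WIRE_SIZES = {
--     # Varint types (1-10 bytes, typically 1-2)
--     'int32': (1, 2, 5),
--     'int64': (1, 3, 10),
--     'uint32': (1, 2, 5),
--     'uint64': (1, 3, 10),
--     'sint32': (1, 2, 5),
--     'sint64': (1, 3, 10),
--     'bool': (1, 1, 1),
--     'enum': (1, 1, 2),
--
--     # Fixed types
--     'fixed32': (4, 4, 4),
--     'fixed64': (8, 8, 8),
--     'sfixed32': (4, 4, 4),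
--     'sfixed64': (8, 8, 8),
--     'float': (4, 4, 4),
--     'double': (8, 8, 8),
--
--     # Length-delimited (variable)
--     'string': (1, 20, 256),
--     'bytes': (1, 50, 1024),
--     'message': (2, 50, 500),
-- }
--
-- def estimate_size(field_type: str, modifier: str, messages: dict) -> tuple:
--     """Estimate min/typical/max size for a field."""
--     base_type = field_type.lower()
--     tag_size = 1  # Most fields have number < 16
--
--     if base_type in WIRE_SIZES:
--         min_s, typ_s, max_s = WIRE_SIZES[base_type]
--     elif field_type in messages:
--         nested = messages[field_type]
--         min_s, typ_s, max_s = estimate_message_size(nested, messages)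
--         min_s += 1
--         typ_s += 1
--         max_s += 2
--     else:
--         min_s, typ_s, max_s = 1, 2, 4
--
--     if modifier == 'repeated':
--         return (0, (tag_size + typ_s) * 3, (tag_size + max_s) * 10)
--     elif modifier == 'optional':
--         return (0, tag_size + typ_s, tag_size + max_s)
--     else:
--         return (tag_size + min_s, tag_size + typ_s, tag_size + max_s)
--
-- def estimate_message_size(msg: dict, all_messages: dict) -> tuple:
--     """Estimate total message size."""
--     min_total = 0
--     typ_total = 0
--     max_total = 0
--
--     for field in msg.get('fields', []):
--         min_s, typ_s, max_s = estimate_size(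
--             field['type'],
--             field['modifier'],
--             all_messages
--         )
--         min_total += min_s
--         typ_total += typ_s
--         max_total += max_s
--
--     return (min_total, typ_total, max_total)
-- ===== SOURCE B (Python) =====
-- WIRE_SIZES = {
--     'int32': (1, 2, 5),
--     'int64': (1, 3, 10),
--     'uint32': (1, 2, 5),
--     'uint64': (1, 3, 10),
--     'sint32': (1, 2, 5),
--     'sint64': (1, 3, 10),
--     'bool': (1, 1, 1),
--     'enum': (1, 1, 2),
--     'fixed32': (4, 4, 4),
--     'fixed64': (8, 8, 8),
--     'sfixed32': (4, 4, 4),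
--     'sfixed64': (8, 8, 8),
--     'float': (4, 4, 4),
--     'double': (8, 8, 8),
--     'string': (1, 20, 256),
--     'bytes': (1, 50, 1024),
--     'message': (2, 50, 500),
-- }
--
--
-- def _field_triple(field, all_messages, table):
--     ftype = field.get('type', '')
--     modifier = field.get('modifier', '')
--     base = ftype.lower()
--     if base in WIRE_SIZES:
--         mn, tp, mx = WIRE_SIZES[base]
--     elif ftype in all_messages:
--         t = table[ftype]
--         mn, tp, mx = t[0] + 1, t[1] + 1, t[2] + 2
--     else:
--         mn, tp, mx = 1, 2, 4
--     if modifier == 'repeated':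
--         return (0, (1 + tp) * 3, (1 + mx) * 10)
--     if modifier == 'optional':
--         return (0, 1 + tp, 1 + mx)
--     return (1 + mn, 1 + tp, 1 + mx)
--
--
-- def _message_triple(m, all_messages, table):
--     triples = [_field_triple(f, all_messages, table) for f in m.get('fields', [])]
--     return (sum(t[0] for t in triples),
--             sum(t[1] for t in triples),
--             sum(t[2] for t in triples))
--
--
-- def estimate_message_size(msg, all_messages):
--     # Bottom-up dynamic programming: a table of size triples for every named
--     # message, recomputed in len(all_messages) whole-table rounds (enough for
--     # any acyclic reference chain), then one pass over msg using the table.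
--     table = {name: (0, 0, 0) for name in all_messages}
--     for _ in range(len(all_messages)):
--         new = {name: _message_triple(m, all_messages, table)
--                for name, m in all_messages.items()}
--         if new == table:
--             break
--         table = new
--     return _message_triple(msg, all_messages, table)
-- ===== Notes on version B (the rewrite author's own statement) =====
-- stated objective: alternative
-- what changed: Replaces A's top-down recursion, which re-descends into a referenced message at every reference site (exponential on shared/deep reference DAGs), by non-recursive bottom-up dynamic programming: a table mapping every message name to its size triple is recomputed in whole-table rounds until it stops changing (at most len(all_messages) rounds, enough for any acyclic reference chain), then msg is sized in one pass against the table.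
import Mathlib
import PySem

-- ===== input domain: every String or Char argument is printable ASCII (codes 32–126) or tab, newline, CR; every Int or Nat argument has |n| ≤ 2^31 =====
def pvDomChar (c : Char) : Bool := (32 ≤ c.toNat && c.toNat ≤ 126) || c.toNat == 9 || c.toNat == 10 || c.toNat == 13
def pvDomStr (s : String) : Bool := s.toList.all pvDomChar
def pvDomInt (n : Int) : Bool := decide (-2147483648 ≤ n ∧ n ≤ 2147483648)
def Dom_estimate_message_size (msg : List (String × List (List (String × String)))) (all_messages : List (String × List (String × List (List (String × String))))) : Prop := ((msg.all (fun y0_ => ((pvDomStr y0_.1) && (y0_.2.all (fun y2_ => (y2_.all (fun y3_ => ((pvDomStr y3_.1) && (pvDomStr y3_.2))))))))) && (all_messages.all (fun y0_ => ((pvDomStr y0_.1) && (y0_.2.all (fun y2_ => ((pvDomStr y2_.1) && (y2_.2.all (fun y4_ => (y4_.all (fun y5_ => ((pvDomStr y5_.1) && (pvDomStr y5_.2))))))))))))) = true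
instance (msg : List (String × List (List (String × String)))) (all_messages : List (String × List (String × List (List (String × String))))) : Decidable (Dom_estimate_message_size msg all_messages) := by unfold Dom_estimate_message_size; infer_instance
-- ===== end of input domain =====

-- B replaces A's top-down recursion (which re-descends into a referenced message at
-- every reference site) by non-recursive bottom-up dynamic programming over a table of
-- per-message size triples. Pre_ excludes exactly the inputs on which Python A raises
-- (see its comment).

abbrev PVField := List (String × String)
abbrev PVMsg := List (String × List PVField)
abbrev PVTriple := Int × Int × Int

def pvWire : PySem.Dict String PVTriple := PySem.Dict.ofList [
  ("int32", (1, 2, 5)), ("int64", (1, 3, 10)), ("uint32", (1, 2, 5)), ("uint64", (1, 3, 10)),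
  ("sint32", (1, 2, 5)), ("sint64", (1, 3, 10)), ("bool", (1, 1, 1)), ("enum", (1, 1, 2)),
  ("fixed32", (4, 4, 4)), ("fixed64", (8, 8, 8)), ("sfixed32", (4, 4, 4)), ("sfixed64", (8, 8, 8)),
  ("float", (4, 4, 4)), ("double", (8, 8, 8)),
  ("string", (1, 20, 256)), ("bytes", (1, 50, 1024)), ("message", (2, 50, 500))]

-- ===== PORT A =====
-- A's unbounded mutual recursion carries a fuel parameter (Python recurses forever /
-- raises RecursionError on reference cycles; those inputs are outside Pre_); at fuel 0
-- the nested size is taken to be (0,0,0), and a field dict missing the 'type'/'modifier'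
-- key (Python raises KeyError there; outside Pre_) contributes via the default "".
mutual
def pv_estimate_size_A (fuel : Nat) (field_type modifier : String) (messages : PySem.Dict String PVMsg) : PVTriple :=
  let base_type := PySem.Str.lower field_type
  let s : PVTriple :=
    match pvWire.get? base_type with
    | some w => w
    | none =>
      match messages.get? field_type with
      | some nested =>
        let t : PVTriple :=
          match fuel with
          | 0 => (0, 0, 0)
          | f + 1 => pv_msg_size_A f nested messages
        (t.1 + 1, t.2.1 + 1, t.2.2 + 2)
      | none => (1, 2, 4)
  if modifier = "repeated" then (0, (1 + s.2.1) * 3, (1 + s.2.2) * 10)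
  else if modifier = "optional" then (0, 1 + s.2.1, 1 + s.2.2)
  else (1 + s.1, 1 + s.2.1, 1 + s.2.2)
termination_by (fuel, 0, 0)

def pv_msg_loop_A (fuel : Nat) (fields : List PVField) (all : PySem.Dict String PVMsg) (acc : PVTriple) : PVTriple :=
  match fields with
  | [] => acc
  | field :: rest =>
    let s := pv_estimate_size_A fuel ((PySem.Dict.ofList field).getD "type" "")
      ((PySem.Dict.ofList field).getD "modifier" "") all
    pv_msg_loop_A fuel rest all (acc.1 + s.1, acc.2.1 + s.2.1, acc.2.2 + s.2.2)
termination_by (fuel, 1, fields.length)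

def pv_msg_size_A (fuel : Nat) (m : PVMsg) (all : PySem.Dict String PVMsg) : PVTriple :=
  pv_msg_loop_A fuel ((PySem.Dict.ofList m).getD "fields" []) all (0, 0, 0)
termination_by (fuel, 2, 0)
end

def estimate_message_size (msg : List (String × List (List (String × String)))) (all_messages : List (String × List (String × List (List (String × String))))) : List Int :=
  let dictAll := PySem.Dict.ofList all_messages
  let s := pv_msg_size_A dictAll.size msg dictAll
  [s.1, s.2.1, s.2.2]

-- ===== PORT B =====
-- B is non-recursive: one field is sized against a fixed table of per-message triples,
-- one message is the componentwise sum of its fields' triples, and the table is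
-- recomputed in whole-table rounds (at most len(all_messages), breaking once the table
-- stops changing) starting from all-zero entries.
def pv_field_triple_B (all : PySem.Dict String PVMsg) (table : PySem.Dict String PVTriple) (field : PVField) : PVTriple :=
  let ftype := (PySem.Dict.ofList field).getD "type" ""
  let modifier := (PySem.Dict.ofList field).getD "modifier" ""
  let base := PySem.Str.lower ftype
  let s : PVTriple :=
    match pvWire.get? base with
    | some w => w
    | none =>
      if all.contains ftype then
        let t := table.getD ftype (0, 0, 0)
        (t.1 + 1, t.2.1 + 1, t.2.2 + 2)
      else (1, 2, 4)
  if modifier = "repeated" then (0, (1 + s.2.1) * 3, (1 + s.2.2) * 10)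
  else if modifier = "optional" then (0, 1 + s.2.1, 1 + s.2.2)
  else (1 + s.1, 1 + s.2.1, 1 + s.2.2)

def pv_message_triple_B (all : PySem.Dict String PVMsg) (table : PySem.Dict String PVTriple) (m : PVMsg) : PVTriple :=
  let triples := ((PySem.Dict.ofList m).getD "fields" []).map (pv_field_triple_B all table)
  ((triples.map (·.1)).sum, (triples.map (·.2.1)).sum, (triples.map (·.2.2)).sum)

-- one round: the dict comprehension over all_messages.items(), built key by key
def pvRound (all : PySem.Dict String PVMsg) (T : PySem.Dict String PVTriple) : PySem.Dict String PVTriple :=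
  all.items.foldl (fun d p => d.insert p.1 (pv_message_triple_B all T p.2)) PySem.Dict.empty

-- the for-loop with its early break on reaching the fixpoint (Python's new == table:
-- both tables list the keys of all_messages in the same order, so Lean's structural
-- equality on Dict coincides with Python's order-insensitive dict ==)
def pv_tableloop_B (all : PySem.Dict String PVMsg) : Nat → PySem.Dict String PVTriple → PySem.Dict String PVTriple
  | 0, table => table
  | k + 1, table =>
    let new := pvRound all table
    if new = table then table else pv_tableloop_B all k new

def estimate_message_size_alt (msg : List (String × List (List (String × String)))) (all_messages : List (String × List (String × List (List (String × String))))) : List Int :=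
  let all := PySem.Dict.ofList all_messages
  let table0 := all.keys.foldl (fun d n => d.insert n ((0 : Int), (0 : Int), (0 : Int))) PySem.Dict.empty
  let table := pv_tableloop_B all all.size table0
  let r := pv_message_triple_B all table msg
  [r.1, r.2.1, r.2.2]

-- ===== PRECONDITION & SPEC =====
-- helpers for Pre_: the fields of a message, and its "references" (field types that escape
-- the wire-size table and name another message — the edges A's recursion follows)
def pvFieldsOf (m : PVMsg) : List PVField := (PySem.Dict.ofList m).getD "fields" []

def pvRefsOf (all : PySem.Dict String PVMsg) (m : PVMsg) : List String :=
  (pvFieldsOf m).filterMap (fun f =>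
    let t := (PySem.Dict.ofList f).getD "type" ""
    if pvWire.contains (PySem.Str.lower t) = false ∧ all.contains t then some t else none)

-- every chain of message references starting from m has at most k edges
def pvPB (all : PySem.Dict String PVMsg) : Nat → PVMsg → Bool
  | 0, m => pvRefsOf all m = []
  | k + 1, m => (pvRefsOf all m).all (fun x => pvPB all k (all.getD x []))

def pvWellFormed (m : PVMsg) : Bool :=
  (pvFieldsOf m).all (fun f => (PySem.Dict.ofList f).contains "type" && (PySem.Dict.ofList f).contains "modifier")

-- message names reachable from m through reference edges (closed after |all| expansions)
def pvStep (all : PySem.Dict String PVMsg) (S : List String) : List String :=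
  PySem.Set.update S (S.flatMap (fun x => pvRefsOf all (all.getD x [])))

def pvReach (all : PySem.Dict String PVMsg) (m : PVMsg) : List String :=
  Nat.rec (PySem.Set.ofList (pvRefsOf all m)) (fun _ S => pvStep all S) all.size

-- Pre_ excludes exactly the inputs on which Python A raises: (a) a field dict of msg or
-- of a message reachable from msg through references lacks a 'type' or 'modifier' key —
-- A raises KeyError when its traversal meets it; and (b) inputs whose reference chains
-- from msg are unbounded (a reachable reference cycle), on which A's recursion never
-- terminates (RecursionError); chains of an acyclic reachable graph have at most
-- len(all_messages) edges, so the bound excludes nothing real.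
def Pre_estimate_message_size (msg : List (String × List (List (String × String)))) (all_messages : List (String × List (String × List (List (String × String))))) : Prop :=
  let dictAll := PySem.Dict.ofList all_messages
  pvWellFormed msg = true ∧
  (∀ x ∈ pvReach dictAll msg, pvWellFormed (dictAll.getD x []) = true) ∧
  pvPB dictAll dictAll.size msg = true

instance (msg : List (String × List (List (String × String)))) (all_messages : List (String × List (String × List (List (String × String))))) : Decidable (Pre_estimate_message_size msg all_messages) := by unfold Pre_estimate_message_size; infer_instance

def pvWitness_estimate_message_size : (List (String × List (List (String × String)))) × (List (String × List (String × List (List (String × String))))) :=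
  ([("fields", [[("type", "int32"), ("modifier", "")], [("type", "Inner"), ("modifier", "optional")]])],
   [("Inner", [("fields", [[("type", "string"), ("modifier", "repeated")]])])])

def Spec_estimate_message_size (msg : List (String × List (List (String × String)))) (all_messages : List (String × List (String × List (List (String × String))))) (out : List Int) : Prop := out = estimate_message_size_alt msg all_messages
instance (msg : List (String × List (List (String × String)))) (all_messages : List (String × List (String × List (List (String × String))))) (out : List Int) : Decidable (Spec_estimate_message_size msg all_messages out) := by unfold Spec_estimate_message_size; infer_instance

-- ===== CLAIM (what is proved, stated in full; the proofs are below) =====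
def Claim_equal_estimate_message_size : Prop := ∀ (msg : List (String × List (List (String × String)))) (all_messages : List (String × List (String × List (List (String × String))))), Dom_estimate_message_size msg all_messages → Pre_estimate_message_size msg all_messages → Spec_estimate_message_size msg all_messages (estimate_message_size msg all_messages)

-- ===== LEMMAS AND PROOFS =====

-- a descending field of m is one of m's references
theorem pv_ref_mem (all : PySem.Dict String PVMsg) (m : PVMsg) (field : PVField)
    (hf : field ∈ pvFieldsOf m)
    (hw : pvWire.get? (PySem.Str.lower ((PySem.Dict.ofList field).getD "type" "")) = none)
    (hc : all.contains ((PySem.Dict.ofList field).getD "type" "") = true) :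
    (PySem.Dict.ofList field).getD "type" "" ∈ pvRefsOf all m := by
  refine List.mem_filterMap.mpr ⟨field, hf, ?_⟩
  simp only []
  rw [if_pos ⟨by rw [PySem.Dict.contains_eq_isSome_get?, hw]; rfl, hc⟩]

-- a reference forces a positive chain bound, and bounds the referenced message's chains
theorem pvPB_ref (all : PySem.Dict String PVMsg) (j : Nat) (m : PVMsg) (ft : String) (nested : PVMsg)
    (hpb : pvPB all j m = true) (hr : ft ∈ pvRefsOf all m) (hg : all.get? ft = some nested) :
    ∃ j', j = j' + 1 ∧ pvPB all j' nested = true := by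
  cases j with
  | zero =>
    exfalso
    simp only [pvPB, decide_eq_true_eq] at hpb
    rw [hpb] at hr
    cases hr
  | succ j' =>
    refine ⟨j', rfl, ?_⟩
    simp only [pvPB, List.all_eq_true] at hpb
    have := hpb ft hr
    rwa [PySem.Dict.getD_eq_get?_getD, hg] at this

-- B's per-field triple equals A's, given a table correct for shorter chain bounds
theorem pv_field_eq (all : PySem.Dict String PVMsg) (T : PySem.Dict String PVTriple)
    (j : Nat) (m : PVMsg) (field : PVField)
    (hf : field ∈ pvFieldsOf m) (hpb : pvPB all j m = true)
    (hT : ∀ ft nested i, all.get? ft = some nested → i < j → pvPB all i nested = true →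
        T.getD ft (0, 0, 0) = pv_msg_size_A i nested all) :
    pv_field_triple_B all T field
      = pv_estimate_size_A j ((PySem.Dict.ofList field).getD "type" "")
          ((PySem.Dict.ofList field).getD "modifier" "") all := by
  simp only [pv_field_triple_B, pv_estimate_size_A]
  cases hw : pvWire.get? (PySem.Str.lower ((PySem.Dict.ofList field).getD "type" "")) with
  | some w => simp
  | none =>
    simp only []
    cases hg : all.get? ((PySem.Dict.ofList field).getD "type" "") with
    | none =>
      have hc : all.contains ((PySem.Dict.ofList field).getD "type" "") = false := by
        rw [PySem.Dict.contains_eq_isSome_get?, hg]; rfl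
      simp only [hc]
      simp
    | some nested =>
      have hc : all.contains ((PySem.Dict.ofList field).getD "type" "") = true := by
        rw [PySem.Dict.contains_eq_isSome_get?, hg]; rfl
      have hr := pv_ref_mem all m field hf hw hc
      obtain ⟨j', rfl, hpb'⟩ := pvPB_ref all j m _ nested hpb hr hg
      simp only [hc, if_true]
      rw [hT _ nested j' hg (by omega) hpb']

-- A's accumulator loop is the componentwise sum of B's per-field triples
theorem pv_loop_sum (all : PySem.Dict String PVMsg) (T : PySem.Dict String PVTriple)
    (j : Nat) (fields : List PVField)
    (H : ∀ f ∈ fields, pv_field_triple_B all T f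
      = pv_estimate_size_A j ((PySem.Dict.ofList f).getD "type" "")
          ((PySem.Dict.ofList f).getD "modifier" "") all) :
    ∀ acc, pv_msg_loop_A j fields all acc =
      (acc.1 + ((fields.map (pv_field_triple_B all T)).map (·.1)).sum,
       acc.2.1 + ((fields.map (pv_field_triple_B all T)).map (·.2.1)).sum,
       acc.2.2 + ((fields.map (pv_field_triple_B all T)).map (·.2.2)).sum) := by
  induction fields with
  | nil => intro acc; rw [pv_msg_loop_A]; simp
  | cons f rest ih =>
    intro acc
    rw [pv_msg_loop_A]
    rw [← H f List.mem_cons_self]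
    rw [ih (fun g hg => H g (List.mem_cons_of_mem _ hg))]
    simp [add_assoc]

-- B's one-message pass equals A's recursive size, given a table that is correct for
-- every strictly shorter chain bound
theorem pv_msg_eq (all : PySem.Dict String PVMsg) (T : PySem.Dict String PVTriple)
    (j : Nat) (m : PVMsg) (hpb : pvPB all j m = true)
    (hT : ∀ ft nested i, all.get? ft = some nested → i < j → pvPB all i nested = true →
        T.getD ft (0, 0, 0) = pv_msg_size_A i nested all) :
    pv_message_triple_B all T m = pv_msg_size_A j m all := by
  rw [pv_msg_size_A, pv_message_triple_B]
  rw [pv_loop_sum all T j ((PySem.Dict.ofList m).getD "fields" [])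
    (fun f hf => pv_field_eq all T j m f hf hpb hT)]
  simp

-- proof-side view of the loop without the break: k rounds applied from the left
def pvIter (all : PySem.Dict String PVMsg) : Nat → PySem.Dict String PVTriple → PySem.Dict String PVTriple
  | 0, T => T
  | k + 1, T => pvIter all k (pvRound all T)

theorem pvIter_succ' (all : PySem.Dict String PVMsg) :
    ∀ (k : Nat) (T : PySem.Dict String PVTriple),
      pvIter all (k + 1) T = pvRound all (pvIter all k T) := by
  intro k
  induction k with
  | zero => intro T; rfl
  | succ k ih =>
    intro T
    show pvIter all (k + 1) (pvRound all T) = _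
    rw [ih (pvRound all T)]
    rfl

-- a fixpoint stays fixed, so the early break never changes the final table
theorem pvIter_fix (all : PySem.Dict String PVMsg) (T : PySem.Dict String PVTriple)
    (h : pvRound all T = T) : ∀ k, pvIter all k T = T := by
  intro k
  induction k with
  | zero => rfl
  | succ k ih => show pvIter all k (pvRound all T) = T; rw [h]; exact ih

theorem pv_tableloop_eq_iter (all : PySem.Dict String PVMsg) :
    ∀ (k : Nat) (T : PySem.Dict String PVTriple), pv_tableloop_B all k T = pvIter all k T := by
  intro k
  induction k with
  | zero => intro T; rfl
  | succ k ih =>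
    intro T
    rw [pv_tableloop_B]
    by_cases h : pvRound all T = T
    · rw [if_pos h]
      show T = pvIter all k (pvRound all T)
      rw [h, pvIter_fix all T h k]
    · rw [if_neg h]
      exact ih (pvRound all T)

-- table correctness: after k rounds the table entry of any message whose reference
-- chains are shorter than k is that message's A-size
theorem pv_table_ok (all : PySem.Dict String PVMsg) (hnd : all.keys.Nodup)
    (T0 : PySem.Dict String PVTriple) :
    ∀ (k : Nat) (x : String) (m' : PVMsg) (j : Nat), all.get? x = some m' → j < k →
      pvPB all j m' = true →
      (pvIter all k T0).getD x (0, 0, 0) = pv_msg_size_A j m' all := by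
  intro k
  induction k with
  | zero => intro x m' j _ h; omega
  | succ k ih =>
    intro x m' j hx hj hpb
    have hmem : (x, m') ∈ all.items := PySem.Dict.mem_items_of_get?_eq_some _ hx
    have hkeys : (all.items.map (·.1)).Nodup := hnd
    have hitems : (pvIter all (k + 1) T0).items
        = all.items.map (fun p => (p.1, pv_message_triple_B all (pvIter all k T0) p.2)) := by
      rw [pvIter_succ', pvRound]
      rw [PySem.Dict.items_foldl_insert_fresh all.items
        (fun p => p.1) (fun p => pv_message_triple_B all (pvIter all k T0) p.2)
        PySem.Dict.empty (fun a _ => PySem.Dict.contains_empty _) hkeys]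
      simp [PySem.Dict.empty]
    have hmem' : (x, pv_message_triple_B all (pvIter all k T0) m')
        ∈ (pvIter all (k + 1) T0).items := by
      rw [hitems]
      exact List.mem_map.mpr ⟨(x, m'), hmem, rfl⟩
    have hnd' : (pvIter all (k + 1) T0).keys.Nodup := by
      have hk : (pvIter all (k + 1) T0).keys = all.keys := by
        simp only [PySem.Dict.keys, hitems, List.map_map]
        rfl
      rw [hk]; exact hnd
    rw [PySem.Dict.getD_of_mem_items _ hmem' hnd']
    exact pv_msg_eq all (pvIter all k T0) j m' hpb
      (fun ft nested i hg hi hp => ih ft nested i hg (by omega) hp)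

-- ===== VERDICT (by name: the statement is the Claim_ definition above) =====
theorem estimate_message_size_spec : Claim_equal_estimate_message_size := by
  intro msg all_messages _ hpre
  obtain ⟨-, -, hpb⟩ := hpre
  unfold Spec_estimate_message_size
  simp only [estimate_message_size, estimate_message_size_alt]
  rw [pv_tableloop_eq_iter]
  rw [pv_msg_eq (PySem.Dict.ofList all_messages) _ (PySem.Dict.ofList all_messages).size msg hpb
    (fun ft nested i hg hi hp => pv_table_ok (PySem.Dict.ofList all_messages)
      (PySem.Dict.nodup_keys_ofList _) _ _ ft nested i hg hi hp)]
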